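-- pv_equiv track=rewrite | github.com/thanpolas/hackerrank | 02.Conway/conway.py | _get_adjacent_cells
-- ===== SOURCE A (Python) =====
-- BOUNDS = (29, 29) #row, col
--
-- def _get_adjacent_cells(pos):
--     cells = []
--     cells.append((pos[0]-1, pos[1]-1))
--     cells.append((pos[0]-1, pos[1]))
--     cells.append((pos[0]-1, pos[1]+1))
--     cells.append((pos[0], pos[1]-1))
--     cells.append((pos[0], pos[1]+1))
--     cells.append((pos[0]+1, pos[1]-1))
--     cells.append((pos[0]+1, pos[1]))
--     cells.append((pos[0]+1, pos[1]+1))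
--     #eliminate out of bounds cells
--     clear_cells = []
--     for cell in cells:
--         if cell[0] < 0 or cell[0] > BOUNDS[0]: continue
--         if cell[1] < 0 or cell[1] > BOUNDS[1]: continue
--         clear_cells.append(cell)
--
--     return clear_cells
-- ===== SOURCE B (Python) =====
-- BOUNDS = (29, 29)  # row, col
--
-- def _get_adjacent_cells(pos):
--     r, c = pos[0], pos[1]
--     cells = []
--     for i in range(max(0, r - 1), min(BOUNDS[0], r + 1) + 1):
--         for j in range(max(0, c - 1), min(BOUNDS[1], c + 1) + 1):
--             if (i, j) != (r, c):
--                 cells.append((i, j))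
--     return cells
-- ===== Notes on version B (the rewrite author's own statement) =====
-- stated objective: alternative
-- what changed: Instead of materialising all 8 neighbour cells and filtering out-of-bounds ones in a second pass, B clamps the row and column ranges up front (max(0,r-1)..min(29,r+1)) and iterates only over the in-bounds 3x3 region, skipping the centre cell.
import Mathlib
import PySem

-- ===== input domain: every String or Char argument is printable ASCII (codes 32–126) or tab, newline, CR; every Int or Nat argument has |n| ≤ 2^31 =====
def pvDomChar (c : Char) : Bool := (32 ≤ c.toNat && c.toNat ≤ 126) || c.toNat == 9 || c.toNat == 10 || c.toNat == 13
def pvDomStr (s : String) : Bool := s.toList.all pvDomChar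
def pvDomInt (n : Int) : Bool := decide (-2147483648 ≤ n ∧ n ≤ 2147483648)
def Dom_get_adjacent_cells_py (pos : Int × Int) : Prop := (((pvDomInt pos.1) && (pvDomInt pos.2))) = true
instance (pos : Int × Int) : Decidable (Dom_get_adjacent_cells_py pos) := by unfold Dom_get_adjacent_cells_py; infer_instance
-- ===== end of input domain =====

-- B replaces "build all 8 neighbours, then filter out-of-bounds" by clamping the row/col
-- ranges up front and looping only over in-bounds cells (objective: alternative decomposition).

-- ===== PORT A =====
def get_adjacent_cells_py (pos : Int × Int) : List (Int × Int) :=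
  let cells : List (Int × Int) := []
  let cells := cells ++ [(pos.1 - 1, pos.2 - 1)]
  let cells := cells ++ [(pos.1 - 1, pos.2)]
  let cells := cells ++ [(pos.1 - 1, pos.2 + 1)]
  let cells := cells ++ [(pos.1, pos.2 - 1)]
  let cells := cells ++ [(pos.1, pos.2 + 1)]
  let cells := cells ++ [(pos.1 + 1, pos.2 - 1)]
  let cells := cells ++ [(pos.1 + 1, pos.2)]
  let cells := cells ++ [(pos.1 + 1, pos.2 + 1)]
  -- eliminate out of bounds cells
  let clear_cells : List (Int × Int) := []
  cells.foldl (fun clear_cells cell =>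
    if cell.1 < 0 ∨ cell.1 > 29 then clear_cells
    else if cell.2 < 0 ∨ cell.2 > 29 then clear_cells
    else clear_cells ++ [cell]) clear_cells

-- ===== PORT B =====
def get_adjacent_cells_py_alt (pos : Int × Int) : List (Int × Int) :=
  let r := pos.1
  let c := pos.2
  let cells : List (Int × Int) := []
  (PySem.List.pyRange (max 0 (r - 1)) (min 29 (r + 1) + 1) 1).foldl (fun cells i =>
    (PySem.List.pyRange (max 0 (c - 1)) (min 29 (c + 1) + 1) 1).foldl (fun cells j =>
      if ¬(i = r ∧ j = c) then cells ++ [(i, j)] else cells) cells) cells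

-- ===== PRECONDITION & SPEC =====
def Spec_get_adjacent_cells_py (pos : Int × Int) (out : List (Int × Int)) : Prop := out = get_adjacent_cells_py_alt pos
instance (pos : Int × Int) (out : List (Int × Int)) : Decidable (Spec_get_adjacent_cells_py pos out) := by unfold Spec_get_adjacent_cells_py; infer_instance

-- ===== CLAIM (what is proved, stated in full; the proofs are below) =====
def Claim_equal_get_adjacent_cells_py : Prop := ∀ (pos : Int × Int), Dom_get_adjacent_cells_py pos → Spec_get_adjacent_cells_py pos (get_adjacent_cells_py pos)

-- ===== LEMMAS AND PROOFS =====

-- the clamped range is exactly the in-bounds part of [a-1, a, a+1]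
theorem pv_rows_char (a : Int) :
    PySem.List.pyRange (max 0 (a - 1)) (min 29 (a + 1) + 1) 1
      = List.filter (fun x => decide (0 ≤ x ∧ x ≤ 29)) [a - 1, a, a + 1] := by
  rcases (by omega : a ≤ -2 ∨ a = -1 ∨ a = 0 ∨ (1 ≤ a ∧ a ≤ 28) ∨ a = 29 ∨ a = 30 ∨ 31 ≤ a) with
    h | h | h | h | h | h | h
  · rw [PySem.List.pyRange_one_eq_nil (by omega)]
    simp only [List.filter]
    rw [decide_eq_false (by omega), decide_eq_false (by omega), decide_eq_false (by omega)]
  · subst h; decide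
  · subst h; decide
  · rw [show max 0 (a - 1) = a - 1 by omega, show min 29 (a + 1) + 1 = (a - 1) + 1 + 1 + 1 by omega,
      PySem.List.pyRange_one_cons (by omega), PySem.List.pyRange_one_cons (by omega),
      PySem.List.pyRange_one_cons (by omega), PySem.List.pyRange_one_eq_nil (by omega)]
    simp only [List.filter]
    rw [decide_eq_true (by omega), decide_eq_true (by omega), decide_eq_true (by omega)]
    norm_num
  · subst h; decide
  · subst h; decide
  · rw [PySem.List.pyRange_one_eq_nil (by omega)]
    simp only [List.filter]
    rw [decide_eq_false (by omega), decide_eq_false (by omega), decide_eq_false (by omega)]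

theorem pv_map_filter_eq_flatMap {α β : Type} (xs : List α) (q : α → Bool) (f : α → β) :
    (xs.filter q).map f = xs.flatMap (fun x => if q x then [f x] else []) := by
  induction xs with
  | nil => simp
  | cons y ys ih => simp only [List.filter_cons, List.flatMap_cons]; split <;> simp [ih]

theorem pv_flatMap_filter {α β : Type} (xs : List α) (p : α → Bool) (g : α → List β) :
    (xs.filter p).flatMap g = xs.flatMap (fun x => if p x then g x else []) := by
  induction xs with
  | nil => simp
  | cons y ys ih => simp only [List.filter_cons, List.flatMap_cons]; split <;> simp [ih]

theorem pv_ite_append_nil {α : Type} (P : Prop) [Decidable P] (xs ys : List α) :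
    (if P then xs ++ ys else []) = (if P then xs else []) ++ (if P then ys else []) := by
  split <;> simp

theorem pv_ite_ite_nil {α : Type} (P Q : Prop) [Decidable P] [Decidable Q] (xs : List α) :
    (if P then (if Q then xs else []) else []) = if P ∧ Q then xs else [] := by
  split_ifs <;> simp_all

theorem pv_main (pos : Int × Int) :
    get_adjacent_cells_py pos = get_adjacent_cells_py_alt pos := by
  obtain ⟨r, c⟩ := pos
  -- A-side: turn the skip/append loop into a flatMap of conditional singletons
  have body_eq : ∀ (acc : List (Int × Int)) (cell : Int × Int),
      (if cell.1 < 0 ∨ cell.1 > 29 then acc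
       else if cell.2 < 0 ∨ cell.2 > 29 then acc else acc ++ [cell])
        = acc ++ (if decide (0 ≤ cell.1 ∧ cell.1 ≤ 29) && decide (0 ≤ cell.2 ∧ cell.2 ≤ 29)
                  then [cell] else []) := by
    intro acc cell; split_ifs <;> simp_all <;> omega
  show (get_adjacent_cells_py (r, c)) = _
  unfold get_adjacent_cells_py get_adjacent_cells_py_alt
  simp only [body_eq, PySem.List.foldl_append_eq_flatMap, pv_rows_char,
    PySem.List.foldl_append_ite, pv_flatMap_filter, pv_map_filter_eq_flatMap]
  simp only [List.flatMap_cons, List.flatMap_nil, List.nil_append, List.append_nil]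
  have hr1 : r - 1 ≠ r := by omega
  have hr2 : r + 1 ≠ r := by omega
  have hc1 : c - 1 ≠ c := by omega
  have hc2 : c + 1 ≠ c := by omega
  simp [hr1, hr2, hc1, hc2, List.flatMap_cons, pv_ite_append_nil, pv_ite_ite_nil,
    List.append_assoc, and_assoc]

-- ===== VERDICT (by name: the statement is the Claim_ definition above) =====
theorem get_adjacent_cells_py_spec : Claim_equal_get_adjacent_cells_py := by
  intro pos _
  unfold Spec_get_adjacent_cells_py
  exact pv_main pos
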